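-- pv_equiv track=rewrite | github.com/efunn/krangler | krangler.py | get_node_by_id
-- ===== SOURCE A (Python) =====
-- def get_node_by_id(tree, node_id):
--     start_offset = 10261
--     subtree = tree[start_offset:]
--     node_str = '['+str(node_id)+']'
--     node_start_found = False
--     for line_idx, line in enumerate(subtree):
--         if node_str in line:
--             node_start_idx = line_idx+2
--             node_start_found = True
--             break
--     if node_start_found:
--         node_end_found = False
--         for line_idx, line in enumerate(subtree[node_start_idx:]):
--             if '[\"group\"]' in line:
--                 node_end_idx = node_start_idx+line_idx
--                 node_end_found = True
--                 break
--     if node_start_found and node_end_found: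
--         return True, node_start_idx+start_offset, node_end_idx+start_offset
--     else:
--         return False, -1, -1
-- ===== SOURCE B (Python) =====
-- def get_node_by_id(tree, node_id):
--     start_offset = 10261
--     marker = '[' + str(node_id) + ']'
--     subtree = tree[start_offset:]
--     # index of every terminator line, built once (ascending)
--     groups = [i for i, line in enumerate(subtree) if '["group"]' in line]
--     for i, line in enumerate(subtree):
--         if marker in line:
--             start = i + 2
--             # binary search: first terminator index >= start
--             lo, hi = 0, len(groups)
--             while lo < hi:
--                 mid = (lo + hi) // 2
--                 if groups[mid] < start:
--                     lo = mid + 1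
--                 else:
--                     hi = mid
--             if lo < len(groups):
--                 return True, start + start_offset, groups[lo] + start_offset
--             return False, -1, -1
--     return False, -1, -1
-- ===== Notes on version B (the rewrite author's own statement) =====
-- stated objective: alternative
-- what changed: B precomputes the ascending list of all terminator-line indices in one pass and then, at the found marker, binary-searches that index list for the first terminator at/after start, replacing A's second linear rescan of a fresh slice.
import Mathlib
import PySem

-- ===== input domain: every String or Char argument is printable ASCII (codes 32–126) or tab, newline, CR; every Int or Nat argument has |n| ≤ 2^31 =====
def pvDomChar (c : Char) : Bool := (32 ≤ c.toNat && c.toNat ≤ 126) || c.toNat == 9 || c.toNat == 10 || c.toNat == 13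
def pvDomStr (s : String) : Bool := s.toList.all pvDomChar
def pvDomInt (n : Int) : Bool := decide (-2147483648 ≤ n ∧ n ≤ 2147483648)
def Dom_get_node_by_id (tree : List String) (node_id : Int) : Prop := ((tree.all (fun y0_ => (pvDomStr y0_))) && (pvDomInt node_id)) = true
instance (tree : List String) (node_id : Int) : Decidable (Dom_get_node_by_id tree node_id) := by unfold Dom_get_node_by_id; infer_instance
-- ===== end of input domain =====

-- B precomputes the list of all terminator-line indices once and binary-searches it for the
-- first terminator at/after the start, instead of A's second linear rescan of a fresh slice.

-- ===== PORT A =====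
-- first loop: enumerate(subtree), break at the first line containing node_str, yielding line_idx+2
def pvLoop1 (node_str : String) : List String → Nat → Option Nat
  | [], _ => none
  | line :: rest, line_idx =>
      if PySem.Str.isIn node_str line then some (line_idx + 2)
      else pvLoop1 node_str rest (line_idx + 1)

-- second loop: enumerate(subtree[node_start_idx:]), break at the first line containing '["group"]', yielding ns+line_idx
def pvLoop2 : List String → Nat → Nat → Option Nat
  | [], _, _ => none
  | line :: rest, line_idx, ns =>
      if PySem.Str.isIn "[\"group\"]" line then some (ns + line_idx)
      else pvLoop2 rest (line_idx + 1) ns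

def get_node_by_id (tree : List String) (node_id : Int) : Bool × Int × Int :=
  let start_offset : Int := 10261
  let subtree := PySem.List.slice tree (some 10261) none
  let node_str := "[" ++ PySem.Int.toStr node_id ++ "]"
  match pvLoop1 node_str subtree 0 with
  | none => (false, -1, -1)
  | some node_start_idx =>
    match pvLoop2 (PySem.List.slice subtree (some (node_start_idx : Int)) none) 0 node_start_idx with
    | none => (false, -1, -1)
    | some node_end_idx =>
        (true, (node_start_idx : Int) + start_offset, (node_end_idx : Int) + start_offset)

-- ===== PORT B =====
-- the comprehension: indices (from counter b) of the lines containing '["group"]'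
def pvGroups : List String → Nat → List Nat
  | [], _ => []
  | line :: rest, i =>
      if PySem.Str.isIn "[\"group\"]" line then i :: pvGroups rest (i + 1)
      else pvGroups rest (i + 1)

-- the while loop: binary search for the first position lo with groups[lo] >= t
def pvBin (groups : List Nat) (t lo hi : Nat) : Nat :=
  if h : lo < hi then
    let mid := (lo + hi) / 2
    if groups.getD mid 0 < t then pvBin groups t (mid + 1) hi
    else pvBin groups t lo mid
  else lo
termination_by hi - lo
decreasing_by all_goals omega

-- the for loop: scan for the marker; on a hit, binary-search the precomputed groups
def pvMarkScan (marker : String) (groups : List Nat) (off : Int) : List String → Nat → Bool × Int × Int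
  | [], _ => (false, -1, -1)
  | line :: rest, i =>
      if PySem.Str.isIn marker line then
        let start := i + 2
        let lo := pvBin groups start 0 groups.length
        if lo < groups.length then (true, (start : Int) + off, (groups.getD lo 0 : Int) + off)
        else (false, -1, -1)
      else pvMarkScan marker groups off rest (i + 1)

def get_node_by_id_alt (tree : List String) (node_id : Int) : Bool × Int × Int :=
  let start_offset : Int := 10261
  let marker := "[" ++ PySem.Int.toStr node_id ++ "]"
  let subtree := PySem.List.slice tree (some 10261) none
  let groups := pvGroups subtree 0
  pvMarkScan marker groups start_offset subtree 0

-- ===== PRECONDITION & SPEC =====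
def Spec_get_node_by_id (tree : List String) (node_id : Int) (out : Bool × Int × Int) : Prop := out = get_node_by_id_alt tree node_id
instance (tree : List String) (node_id : Int) (out : Bool × Int × Int) : Decidable (Spec_get_node_by_id tree node_id out) := by unfold Spec_get_node_by_id; infer_instance

-- ===== CLAIM (what is proved, stated in full; the proofs are below) =====
def Claim_equal_get_node_by_id : Prop := ∀ (tree : List String) (node_id : Int), Dom_get_node_by_id tree node_id → Spec_get_node_by_id tree node_id (get_node_by_id tree node_id)

-- ===== LEMMAS AND PROOFS =====

-- the first group index >= t, by linear scan (proof-only abstraction both sides are reduced to)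
def pvFirstGE (t : Nat) : List Nat → Option Nat
  | [] => none
  | g :: gs => if t ≤ g then some g else pvFirstGE t gs

theorem pvGroups_mem_ge : ∀ (ls : List String) (b : Nat) (g : Nat), g ∈ pvGroups ls b → b ≤ g := by
  intro ls
  induction ls with
  | nil => intro b g h; simp [pvGroups] at h
  | cons l rest ih =>
      intro b g h
      simp only [pvGroups] at h
      split at h
      · rcases List.mem_cons.mp h with h | h
        · omega
        · have := ih (b + 1) g h; omega
      · have := ih (b + 1) g h; omega

theorem pvGroups_sorted : ∀ (ls : List String) (b : Nat), (pvGroups ls b).Pairwise (· < ·) := by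
  intro ls
  induction ls with
  | nil => intro b; simp [pvGroups]
  | cons l rest ih =>
      intro b
      simp only [pvGroups]
      split
      · exact List.pairwise_cons.mpr ⟨fun g hg => by have := pvGroups_mem_ge rest (b + 1) g hg; omega, ih (b + 1)⟩
      · exact ih (b + 1)

-- A's second loop is head? of the group indices from its start counter
theorem pvLoop2_eq_head : ∀ (ls : List String) (c s : Nat), pvLoop2 ls c s = (pvGroups ls (s + c)).head? := by
  intro ls
  induction ls with
  | nil => intro c s; simp [pvLoop2, pvGroups]
  | cons l rest ih =>
      intro c s
      simp only [pvLoop2, pvGroups]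
      split
      · rfl
      · rw [ih (c + 1) s, Nat.add_assoc]

-- dropping d lines keeps exactly the group indices >= b + d
theorem pvGroups_drop : ∀ (ls : List String) (b d : Nat),
    pvGroups (ls.drop d) (b + d) = (pvGroups ls b).filter (fun g => decide (b + d ≤ g)) := by
  intro ls
  induction ls with
  | nil => intro b d; simp [pvGroups]
  | cons l rest ih =>
      intro b d
      cases d with
      | zero =>
          simp only [List.drop_zero, Nat.add_zero]
          exact (List.filter_eq_self.mpr (fun g hg => decide_eq_true (pvGroups_mem_ge _ b g hg))).symm
      | succ k =>
          simp only [List.drop_succ_cons, pvGroups]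
          have h1 : b + (k + 1) = (b + 1) + k := by omega
          rw [h1, ih (b + 1) k]
          split
          · rw [List.filter_cons_of_neg (by simp; omega)]
          · rfl

theorem pvFirstGE_eq_head_filter : ∀ (gs : List Nat) (t : Nat),
    pvFirstGE t gs = ((gs.filter (fun g => decide (t ≤ g))).head?) := by
  intro gs t
  induction gs with
  | nil => rfl
  | cons g gs ih =>
      simp only [pvFirstGE, List.filter_cons]
      by_cases h : t ≤ g
      · simp [h]
      · simp [h, ih]

-- binary search returns the boundary position: everything before it is < t, everything from it on is >= t
theorem pvBin_spec (groups : List Nat) (t : Nat) (hs : groups.Pairwise (· ≤ ·)) :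
    ∀ (n lo hi : Nat), hi ≤ lo + n → lo ≤ hi → hi ≤ groups.length →
    (∀ j, j < lo → groups.getD j 0 < t) →
    (∀ j, hi ≤ j → j < groups.length → t ≤ groups.getD j 0) →
    (∀ j, j < pvBin groups t lo hi → groups.getD j 0 < t) ∧
    (∀ j, pvBin groups t lo hi ≤ j → j < groups.length → t ≤ groups.getD j 0) ∧
    pvBin groups t lo hi ≤ groups.length := by
  have hmono : ∀ i j, i ≤ j → j < groups.length → groups.getD i 0 ≤ groups.getD j 0 := by
    intro i j hij hj
    rcases Nat.eq_or_lt_of_le hij with rfl | hlt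
    · exact le_refl _
    · have hi : i < groups.length := lt_trans hlt hj
      have := (List.pairwise_iff_getElem.mp hs) i j hi hj hlt
      rwa [List.getD_eq_getElem groups 0 hi, List.getD_eq_getElem groups 0 hj]
  intro n
  induction n with
  | zero =>
      intro lo hi hn hlo hhi hlow hhigh
      have h : ¬ lo < hi := by omega
      rw [pvBin, dif_neg h]
      exact ⟨hlow, fun j hj hjl => hhigh j (by omega) hjl, by omega⟩
  | succ n ihn =>
      intro lo hi hn hlo hhi hlow hhigh
      by_cases h : lo < hi
      · rw [pvBin, dif_pos h]
        by_cases hc : groups.getD ((lo + hi) / 2) 0 < t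
        · simp only [hc, if_true]
          exact ihn ((lo + hi) / 2 + 1) hi (by omega) (by omega) hhi
            (fun j hj => by
              rcases Nat.lt_or_ge j lo with h' | h'
              · exact hlow j h'
              · exact lt_of_le_of_lt (hmono j ((lo + hi) / 2) (by omega) (by omega)) hc)
            hhigh
        · simp only [hc, if_false]
          exact ihn lo ((lo + hi) / 2) (by omega) (by omega) (by omega) hlow
            (fun j hj hjl => le_trans (Nat.le_of_not_lt hc) (hmono ((lo + hi) / 2) j (by omega) hjl))
      · rw [pvBin, dif_neg h]
        exact ⟨hlow, fun j hj hjl => hhigh j (by omega) hjl, by omega⟩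

-- the boundary position characterises pvFirstGE
theorem pvFirstGE_of_boundary : ∀ (gs : List Nat) (t r : Nat),
    (∀ j, j < r → gs.getD j 0 < t) → (∀ j, r ≤ j → j < gs.length → t ≤ gs.getD j 0) →
    pvFirstGE t gs = gs[r]? := by
  intro gs
  induction gs with
  | nil => intro t r _ _; simp [pvFirstGE]
  | cons g gs ih =>
      intro t r hlow hhigh
      cases r with
      | zero =>
          have : t ≤ g := hhigh 0 (by omega) (by simp)
          simp [pvFirstGE, this]
      | succ r' =>
          have hg : g < t := hlow 0 (by omega)
          show (if t ≤ g then some g else pvFirstGE t gs) = _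
          rw [if_neg (Nat.not_le.mpr hg), List.getElem?_cons_succ]
          exact ih t r' (fun j hj => hlow (j + 1) (by omega))
            (fun j hj hjl => hhigh (j + 1) (by omega) (by simpa using hjl))

-- B's marker scan in terms of A's first loop
theorem pvMarkScan_eq (marker : String) (groups : List Nat) (off : Int) :
    ∀ (ls : List String) (i : Nat),
    pvMarkScan marker groups off ls i =
      (match pvLoop1 marker ls i with
       | none => (false, -1, -1)
       | some ns =>
           if pvBin groups ns 0 groups.length < groups.length then
             (true, (ns : Int) + off, (groups.getD (pvBin groups ns 0 groups.length) 0 : Int) + off)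
           else (false, -1, -1)) := by
  intro ls
  induction ls with
  | nil => intro i; rfl
  | cons l rest ih =>
      intro i
      simp only [pvMarkScan, pvLoop1]
      split
      · rfl
      · exact ih (i + 1)

-- ===== VERDICT (by name: the statement is the Claim_ definition above) =====
theorem get_node_by_id_spec : Claim_equal_get_node_by_id := by
  intro tree node_id _
  simp only [Spec_get_node_by_id, get_node_by_id, get_node_by_id_alt]
  rw [pvMarkScan_eq]
  set sub := PySem.List.slice tree (some 10261) none with hsub
  set marker := "[" ++ PySem.Int.toStr node_id ++ "]" with hmarker
  cases hL : pvLoop1 marker sub 0 with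
  | none => rfl
  | some ns =>
      simp only []
      set groups := pvGroups sub 0 with hgroups
      have hsorted : groups.Pairwise (· ≤ ·) :=
        (pvGroups_sorted sub 0).imp (fun h => Nat.le_of_lt h)
      obtain ⟨h1, h2, _⟩ := pvBin_spec groups ns hsorted groups.length 0 groups.length (by omega)
        (by omega) (le_refl _) (fun j hj => absurd hj (by omega)) (fun j hj hjl => absurd hjl (by omega))
      have hfge : pvFirstGE ns groups = groups[pvBin groups ns 0 groups.length]? :=
        pvFirstGE_of_boundary groups ns _ h1 h2
      have hA : pvLoop2 (PySem.List.slice sub (some (ns : Int)) none) 0 ns = pvFirstGE ns groups := by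
        rw [PySem.List.slice_from_natCast, pvLoop2_eq_head]
        have hd : ns + 0 = 0 + ns := by omega
        rw [hd, pvGroups_drop sub 0 ns, ← pvFirstGE_eq_head_filter, ← hgroups]
        simp only [Nat.zero_add]
      rw [hA, hfge]
      set r := pvBin groups ns 0 groups.length with hr
      by_cases hlt : r < groups.length
      · rw [List.getElem?_eq_getElem hlt]
        simp only [hlt, if_pos]
        rw [List.getD_eq_getElem groups 0 hlt]
      · rw [List.getElem?_eq_none (by omega)]
        simp [hlt]
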